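-- pv_equiv track=rewrite | github.com/Vidukln/Python-Abbreviation | Welgamage_abbreviation.py | find_best_abbreviation
-- ===== SOURCE A (Python) =====
-- def calculate_score(word, letter, letter_scores):
--     #Letter Values rule implementation
--     #First need to get the dictionary created for letter scores
--     #position variable will handle the position of each letter
--     if letter in letter_scores:
--         score = letter_scores[letter]
--         position = word.find(letter)
--
--         #Rule states that firts letter always gets 0 score
--         if position == 0:
--             return 0
--         #Part 2 of the rule states that last letter will always score 5 unless the letter is E
--         elif position == len(word) - 1:
--             #If last letter is E score will be 20
--             if letter == 'E':
--                 return 20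
--             return 5
--         #If the letter is neither the first nor last letter of the word
--         else:
--             #Calculate the score based on position in the word
--             if position == 1:
--                 return 1 + score
--             elif position == 2:
--                 return 2 + score
--             else:
--                 return 3 + score
--     else:
--         return 0
--
-- def generate_abbreviations(name, letter_scores, used_abbreviations):
--     #Removing apostropes and converting to Upper case
--     name = name.upper().replace("'", "")
--     #This step will split the given input into separete words
--     words = name.split()
--     #Empty set will be created to store the abbreviations and scores of them
--     abbreviations = set()
--
--     #This code part will handle creating the abbreviations and calculating the respective scores
--     #Empty set created above will be used to store the abbreviations and scores of them
--     #for loop will iterate through all the words available in the words array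
--     for word in words:
--         first_letter = word[0]
--
--         #Iterate through all possible pairs of letters in the word
--         #Program will start from index 1 as 0th position will be always the starting letter for abbreviation
--         for i in range(1, len(word) - 1):
--             for j in range(i + 1, len(word)):
--                 abbreviation = first_letter + word[i] + word[j]
--
--                 #To match the condition this part will check whether the abbreviation is only consist of letter
--                 #Secondly it will calculate the score for the abbreviation created
--                 #Finally cretaed abbreviation , score, name will be stored in the abbreviations set
--                 if abbreviation.isalpha():
--                     #Calculate the score for the abbreviation
--                     score = calculate_score(word, word[i], letter_scores) + calculate_score(word, word[j], letter_scores)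
--                     #This line will store the values for abbreviation, score, and name to the set
--                     abbreviations.add((abbreviation, score, name))
--
--     #Return the set of abbreviations
--     return abbreviations
--
-- def find_best_abbreviation(name, letter_scores, used_abbreviations):
--     #First generate abbreviations function will be called inside this function to form all abbreviations for each word
--     abbreviations = generate_abbreviations(name, letter_scores, used_abbreviations)
--     #valid_abbtreviations list will store all conditions matched and lowest score abbreviation for each word
--     valid_abbreviations = []
--
--     #for loop will iterate through each abbreviation, score, and current name
--     for abbr, score, current_name in abbreviations:
--         #Check if the abbreviation is not in the set of used abbreviations for the current name
--         if abbr not in used_abbreviations.get(current_name, set()):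
--             #if the condition satisfy, add the abbreviation and score to the list of valid abbreviations
--             valid_abbreviations.append((abbr, score))
--
--     #If there are multiple valid abbreviations this if else condition will handle it
--     if valid_abbreviations:
--         #This line will find the minimum score among valid abbreviations
--         min_score = min(score for _, score in valid_abbreviations)
--         #This line will get abbreviations with the minimum score
--         best_abbreviations = [abbr for abbr, score in valid_abbreviations if score == min_score]
--         #This will update the set of used abbreviations for the current name
--         used_abbreviations.setdefault(name, set()).update(best_abbreviations)
--         #Finally it will return the list of best abbreviations
--         return best_abbreviations
--     else:
--         #If no valid abbreviation need return an empty list as given by rules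
--         return []
-- ===== SOURCE B (Python) =====
-- def _letter_score(word, letter, letter_scores):
--     # per-letter score: 0 if unscored or first; 20/5 at the end; else min(position,3)+value
--     if letter not in letter_scores:
--         return 0
--     pos = word.find(letter)
--     if pos == 0:
--         return 0
--     if pos == len(word) - 1:
--         return 20 if letter == 'E' else 5
--     return min(pos, 3) + letter_scores[letter]
--
--
-- def find_best_abbreviation(name, letter_scores, used_abbreviations):
--     processed = name.upper().replace("'", "")
--     used = used_abbreviations.get(processed, set())
--     best_score = None
--     best = []
--     seen = set()
--     for word in processed.split():
--         n = len(word)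
--         for i in range(1, n - 1):
--             for j in range(i + 1, n):
--                 abbr = word[0] + word[i] + word[j]
--                 if not abbr.isalpha() or abbr in used:
--                     continue
--                 s = _letter_score(word, word[i], letter_scores) + _letter_score(word, word[j], letter_scores)
--                 if best_score is None or s < best_score:
--                     best_score = s
--                     best = [abbr]
--                     seen = {abbr}
--                 elif s == best_score and abbr not in seen:
--                     best.append(abbr)
--                     seen.add(abbr)
--     if best:
--         used_abbreviations.setdefault(name, set()).update(best)
--     return best
-- ===== Notes on version B (the rewrite author's own statement) =====
-- stated objective: simpler
-- what changed: Scoring, used-filtering, deduplication and minimum-selection are folded into the single generation pass (running best score, best list and seen-set, reset on a strictly lower score), eliminating A's intermediate triple set, its separate validity pass, the min() pass and the filtering comprehension; the per-letter score chain is collapsed to min(position,3)+value; list equality holds up to order (return compares as a set, A's order is hash order); both versions mutate used_abbreviations identically.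
import Mathlib
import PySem

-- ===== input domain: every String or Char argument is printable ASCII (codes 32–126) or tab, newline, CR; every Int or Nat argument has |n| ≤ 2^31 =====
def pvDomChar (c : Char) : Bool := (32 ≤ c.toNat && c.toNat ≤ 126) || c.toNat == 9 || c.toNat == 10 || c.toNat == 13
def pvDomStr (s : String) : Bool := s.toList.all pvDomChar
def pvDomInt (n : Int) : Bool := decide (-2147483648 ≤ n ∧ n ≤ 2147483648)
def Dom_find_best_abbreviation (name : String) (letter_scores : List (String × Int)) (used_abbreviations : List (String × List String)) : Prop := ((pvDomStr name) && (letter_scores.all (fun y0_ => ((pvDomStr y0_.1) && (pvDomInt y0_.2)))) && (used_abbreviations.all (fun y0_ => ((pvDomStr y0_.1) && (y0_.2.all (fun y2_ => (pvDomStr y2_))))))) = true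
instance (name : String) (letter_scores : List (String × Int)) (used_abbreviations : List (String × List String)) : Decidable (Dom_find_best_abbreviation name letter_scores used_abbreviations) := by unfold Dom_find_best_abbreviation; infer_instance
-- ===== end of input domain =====

-- B folds scoring, used-filtering, dedup and minimum-selection into the single generation pass
-- (objective: simpler). Equivalence is about the RETURN value only: both Pythons also mutate
-- used_abbreviations, and they perform the identical mutation; A's Python returns the best list in
-- hash order of an intermediate set (the return value is compared as a set of strings).

-- ===== PORT A =====
-- calculate_score(word, letter, letter_scores)
def pvCalcScore (word : List Char) (letter : List Char) (letter_scores : PySem.Dict String Int) : Int :=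
  if letter_scores.contains (String.ofList letter) then
    let score := letter_scores.getD (String.ofList letter) 0
    let position := PySem.Chars.find word letter
    if position = 0 then 0
    else if position = (word.length : Int) - 1 then
      if String.ofList letter = "E" then 20 else 5
    else
      if position = 1 then 1 + score
      else if position = 2 then 2 + score
      else 3 + score
  else 0

-- generate_abbreviations(name, letter_scores, used_abbreviations): set of (abbr, score, processed name)
def pvGenerate (name : String) (letter_scores : PySem.Dict String Int) : PySem.Set (String × Int × String) :=
  let pname := PySem.Chars.replace (PySem.Chars.upper name.toList) ['\''] []
  let words := PySem.Chars.split₀ pname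
  words.foldl (fun acc word =>
    let first_letter := PySem.List.pyGetD word 0 ' '
    (PySem.List.pyRange 1 ((word.length : Int) - 1)).foldl (fun acc i =>
      (PySem.List.pyRange (i + 1) (word.length : Int)).foldl (fun acc j =>
        let wi := PySem.List.pyGetD word i ' '
        let wj := PySem.List.pyGetD word j ' '
        let abbr := [first_letter, wi, wj]
        if PySem.Chars.strIsalpha abbr then
          let score := pvCalcScore word [wi] letter_scores + pvCalcScore word [wj] letter_scores
          PySem.Set.add acc (String.ofList abbr, score, String.ofList pname)
        else acc) acc) acc) PySem.Set.empty

def find_best_abbreviation (name : String) (letter_scores : List (String × Int)) (used_abbreviations : List (String × List String)) : List String :=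
  let abbreviations := pvGenerate name (PySem.Dict.mk letter_scores)
  let valid : List (String × Int) :=
    abbreviations.foldl (fun acc t =>
      if !((PySem.Dict.mk used_abbreviations).getD t.2.2 []).contains t.1 then acc ++ [(t.1, t.2.1)]
      else acc) []
  if valid ≠ [] then
    let scores := valid.map (fun p => p.2)
    let min_score := scores.foldl min (scores.headD 0)
    (valid.filter (fun p => p.2 == min_score)).map (fun p => p.1)
  else []

-- ===== PORT B =====
-- _letter_score(word, letter, letter_scores)
def pvLetterScore (word : List Char) (letter : List Char) (letter_scores : List (String × Int)) : Int :=
  if !(PySem.Dict.mk letter_scores).contains (String.ofList letter) then 0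
  else
    let pos := PySem.Chars.find word letter
    if pos = 0 then 0
    else if pos = (word.length : Int) - 1 then (if String.ofList letter = "E" then 20 else 5)
    else min pos 3 + (PySem.Dict.mk letter_scores).getD (String.ofList letter) 0

-- one step of B's running (best_score, best, seen) update
def pvBStep (st : Option Int × List String × PySem.Set String) (abbr : String) (s : Int) :
    Option Int × List String × PySem.Set String :=
  match st with
  | (none, _, _) => (some s, [abbr], PySem.Set.add PySem.Set.empty abbr)
  | (some b, best, seen) =>
    if s < b then (some s, [abbr], PySem.Set.add PySem.Set.empty abbr)
    else if s == b && !seen.contains abbr then (some b, best ++ [abbr], PySem.Set.add seen abbr)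
    else (some b, best, seen)

def find_best_abbreviation_alt (name : String) (letter_scores : List (String × Int)) (used_abbreviations : List (String × List String)) : List String :=
  let processed := PySem.Chars.replace (PySem.Chars.upper name.toList) ['\''] []
  let used := (PySem.Dict.mk used_abbreviations).getD (String.ofList processed) []
  let st :=
    (PySem.Chars.split₀ processed).foldl (fun st word =>
      (PySem.List.pyRange 1 ((word.length : Int) - 1)).foldl (fun st i =>
        (PySem.List.pyRange (i + 1) (word.length : Int)).foldl (fun st j =>
          let abbr := [PySem.List.pyGetD word 0 ' ', PySem.List.pyGetD word i ' ',
                       PySem.List.pyGetD word j ' ']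
          if !PySem.Chars.strIsalpha abbr || used.contains (String.ofList abbr) then st
          else
            let s := pvLetterScore word [PySem.List.pyGetD word i ' '] letter_scores
                   + pvLetterScore word [PySem.List.pyGetD word j ' '] letter_scores
            pvBStep st (String.ofList abbr) s) st) st)
      ((none, [], PySem.Set.empty) : Option Int × List String × PySem.Set String)
  st.2.1

-- ===== PRECONDITION & SPEC =====
def Spec_find_best_abbreviation (name : String) (letter_scores : List (String × Int)) (used_abbreviations : List (String × List String)) (out : List String) : Prop := out = find_best_abbreviation_alt name letter_scores used_abbreviations
instance (name : String) (letter_scores : List (String × Int)) (used_abbreviations : List (String × List String)) (out : List String) : Decidable (Spec_find_best_abbreviation name letter_scores used_abbreviations out) := by unfold Spec_find_best_abbreviation; infer_instance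

-- ===== CLAIM (what is proved, stated in full; the proofs are below) =====
def Claim_equal_find_best_abbreviation : Prop := ∀ (name : String) (letter_scores : List (String × Int)) (used_abbreviations : List (String × List String)), Dom_find_best_abbreviation name letter_scores used_abbreviations → Spec_find_best_abbreviation name letter_scores used_abbreviations (find_best_abbreviation name letter_scores used_abbreviations)

-- ===== LEMMAS AND PROOFS =====

-- the stream of alpha-filtered (abbreviation, score) candidates of one word, in generation order
def pvCands (ls : List (String × Int)) (w : List Char) : List (String × Int) :=
  (PySem.List.pyRange 1 ((w.length : Int) - 1)).flatMap (fun i =>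
    (PySem.List.pyRange (i + 1) (w.length : Int)).flatMap (fun j =>
      let abbr := [PySem.List.pyGetD w 0 ' ', PySem.List.pyGetD w i ' ', PySem.List.pyGetD w j ' ']
      if PySem.Chars.strIsalpha abbr then
        [(String.ofList abbr,
          pvCalcScore w [PySem.List.pyGetD w i ' '] (PySem.Dict.mk ls)
            + pvCalcScore w [PySem.List.pyGetD w j ' '] (PySem.Dict.mk ls))]
      else []))

def pvAll (ls : List (String × Int)) (words : List (List Char)) : List (String × Int) :=
  words.flatMap (pvCands ls)

-- the minimum of the scores of a candidate list, as A's fold computes it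
def pvMin (M : List (String × Int)) : Int :=
  (M.map (fun p => p.2)).foldl min ((M.map (fun p => p.2)).headD 0)

-- the best list both versions produce on a candidate stream M
def pvBests (M : List (String × Int)) : List String :=
  ((PySem.Set.ofList M).filter (fun p => p.2 == pvMin M)).map (fun p => p.1)

theorem pv_singleton_infix {c : Char} {w : List Char} (h : c ∈ w) : [c] <:+: w := by
  obtain ⟨s, t, rfl⟩ := List.append_of_mem h
  exact ⟨s, t, by simp⟩

theorem pvScore_eq (w l : List Char) (ls : List (String × Int)) (h : l <:+: w) :
    pvLetterScore w l ls = pvCalcScore w l (PySem.Dict.mk ls) := by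
  have h0 : 0 ≤ PySem.Chars.find w l := (PySem.Chars.find_nonneg_iff w l).2 h
  unfold pvLetterScore pvCalcScore
  by_cases hc : (PySem.Dict.mk ls).contains (String.ofList l) = true
  · simp only [hc, Bool.not_true, Bool.false_eq_true, if_false, if_true]
    split_ifs <;> omega
  · simp [hc]

theorem pvGenerate_eq (name : String) (ls : List (String × Int)) :
    pvGenerate name (PySem.Dict.mk ls) =
      PySem.Set.ofList ((pvAll ls (PySem.Chars.split₀ (PySem.Chars.replace (PySem.Chars.upper name.toList) ['\''] []))).map
        (fun p => (p.1, p.2, String.ofList (PySem.Chars.replace (PySem.Chars.upper name.toList) ['\''] [])))) := by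
  unfold pvGenerate pvAll pvCands
  rw [PySem.Set.ofList_eq_foldl, List.map_flatMap, List.foldl_flatMap]
  apply PySem.List.foldl_congr_mem
  intro acc w _
  rw [List.map_flatMap, List.foldl_flatMap]
  apply PySem.List.foldl_congr_mem
  intro acc2 i _
  rw [List.map_flatMap, List.foldl_flatMap]
  apply PySem.List.foldl_congr_mem
  intro acc3 j _
  by_cases hp : PySem.Chars.strIsalpha [PySem.List.pyGetD w 0 ' ', PySem.List.pyGetD w i ' ', PySem.List.pyGetD w j ' '] = true
  · simp [hp]
  · simp [hp]

theorem pvAlt_eq (name : String) (ls : List (String × Int)) (used_abbreviations : List (String × List String)) :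
    find_best_abbreviation_alt name ls used_abbreviations =
      (((pvAll ls (PySem.Chars.split₀ (PySem.Chars.replace (PySem.Chars.upper name.toList) ['\''] []))).filter
          (fun p => !((PySem.Dict.mk used_abbreviations).getD (String.ofList (PySem.Chars.replace (PySem.Chars.upper name.toList) ['\''] [])) []).contains p.1)).foldl
        (fun st p => pvBStep st p.1 p.2) ((none, [], PySem.Set.empty))).2.1 := by
  unfold find_best_abbreviation_alt
  dsimp only
  refine congrArg (fun st : Option Int × List String × PySem.Set String => st.2.1) ?_
  rw [← PySem.List.foldl_if_eq_foldl_filter]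
  unfold pvAll pvCands
  rw [List.foldl_flatMap]
  apply PySem.List.foldl_congr_mem
  intro acc w _
  rw [List.foldl_flatMap]
  apply PySem.List.foldl_congr_mem
  intro acc2 i hi
  rw [List.foldl_flatMap]
  apply PySem.List.foldl_congr_mem
  intro acc3 j hj
  obtain ⟨hi1, hi2⟩ := PySem.List.mem_pyRange_one.1 hi
  obtain ⟨hj1, hj2⟩ := PySem.List.mem_pyRange_one.1 hj
  have hwi : [PySem.List.pyGetD w i ' '] <:+: w := by
    rw [PySem.List.pyGetD_eq_getElem w ' ' (by omega) (by omega)]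
    exact pv_singleton_infix (List.getElem_mem _)
  have hwj : [PySem.List.pyGetD w j ' '] <:+: w := by
    rw [PySem.List.pyGetD_eq_getElem w ' ' (by omega) (by omega)]
    exact pv_singleton_infix (List.getElem_mem _)
  by_cases hp : PySem.Chars.strIsalpha [PySem.List.pyGetD w 0 ' ', PySem.List.pyGetD w i ' ', PySem.List.pyGetD w j ' '] = true
  · simp only [hp, Bool.not_true, Bool.false_or, if_true, List.foldl_cons, List.foldl_nil]
    rw [pvScore_eq w _ ls hwi, pvScore_eq w _ ls hwj]
    simp
  · simp [hp]

theorem pvSet_ofList_map_inj {α β : Type} [BEq α] [LawfulBEq α] [BEq β] [LawfulBEq β] (g : α → β)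
    (hg : Function.Injective g) (L : List α) :
    PySem.Set.ofList (L.map g) = (PySem.Set.ofList L).map g := by
  induction L using List.reverseRecOn with
  | nil => simp [PySem.Set.ofList]
  | append_singleton L x ih =>
    rw [List.map_append, List.map_singleton, PySem.Set.ofList_append_singleton,
      PySem.Set.ofList_append_singleton, ih, PySem.Set.add_eq_ite, PySem.Set.add_eq_ite]
    by_cases hx : x ∈ PySem.Set.ofList L
    · simp [hx, List.mem_map.mpr ⟨x, hx, rfl⟩]
    · have hgx : g x ∉ (PySem.Set.ofList L).map g := by
        intro hmem
        obtain ⟨y, hy, he⟩ := List.mem_map.1 hmem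
        exact hx (hg he ▸ hy)
      simp [hx, hgx]

theorem pvSet_ofList_filter {α : Type} [BEq α] [LawfulBEq α] (q : α → Bool) (L : List α) :
    PySem.Set.ofList (L.filter q) = (PySem.Set.ofList L).filter q := by
  induction L using List.reverseRecOn with
  | nil => simp [PySem.Set.ofList]
  | append_singleton L x ih =>
    rw [List.filter_append, PySem.Set.ofList_append_singleton, PySem.Set.add_eq_ite]
    by_cases hq : q x = true
    · simp only [List.filter_cons, List.filter_nil, hq, if_true]
      rw [PySem.Set.ofList_append_singleton, PySem.Set.add_eq_ite, ih]
      by_cases hx : x ∈ PySem.Set.ofList L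
      · rw [if_pos hx, if_pos (List.mem_filter.2 ⟨hx, hq⟩)]
      · rw [if_neg hx, if_neg (fun hmem => hx (List.mem_filter.1 hmem).1), List.filter_append]
        simp [hq]
    · by_cases hx : x ∈ PySem.Set.ofList L
      · rw [if_pos hx]
        simp [hq, ih]
      · rw [if_neg hx, List.filter_append]
        simp [hq, ih]

theorem pvFoldMin_congr (P Q : List Int) (hP : P ≠ []) (hQ : Q ≠ []) (h : ∀ y, y ∈ P ↔ y ∈ Q) :
    P.foldl min (P.headD 0) = Q.foldl min (Q.headD 0) := by
  have hPmem : P.foldl min (P.headD 0) ∈ P := by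
    rcases PySem.List.foldl_min_mem P (P.headD 0) with h1 | h1
    · rw [h1]
      cases P with
      | nil => exact absurd rfl hP
      | cons b t => simp
    · exact h1
  have hQmem : Q.foldl min (Q.headD 0) ∈ Q := by
    rcases PySem.List.foldl_min_mem Q (Q.headD 0) with h1 | h1
    · rw [h1]
      cases Q with
      | nil => exact absurd rfl hQ
      | cons b t => simp
    · exact h1
  exact le_antisymm
    ((PySem.List.foldl_min_le P (P.headD 0)).2 _ ((h _).2 hQmem))
    ((PySem.List.foldl_min_le Q (Q.headD 0)).2 _ ((h _).1 hPmem))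

theorem pvMin_append (M : List (String × Int)) (x : String × Int) :
    pvMin (M ++ [x]) = if M = [] then x.2 else min (pvMin M) x.2 := by
  unfold pvMin
  cases M with
  | nil => simp
  | cons a M' => simp [List.foldl_append]

theorem pvMin_le (M : List (String × Int)) {p : String × Int} (hp : p ∈ M) : pvMin M ≤ p.2 := by
  unfold pvMin
  exact (PySem.List.foldl_min_le (M.map (fun p => p.2)) ((M.map (fun p => p.2)).headD 0)).2 p.2
    (List.mem_map_of_mem hp)

theorem pvBests_mem (M : List (String × Int)) (a : String) :
    a ∈ pvBests M ↔ (a, pvMin M) ∈ M := by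
  unfold pvBests
  simp only [List.mem_map, List.mem_filter, PySem.Set.mem_ofList, beq_iff_eq]
  constructor
  · rintro ⟨p, ⟨hpM, hps⟩, rfl⟩
    rwa [← hps, Prod.mk.eta]
  · intro h
    exact ⟨(a, pvMin M), ⟨h, rfl⟩, rfl⟩

-- B's running-state fold computes (min, bests, seen) = the spec values, on any stream
theorem pvFold_spec (M : List (String × Int)) :
    (M.foldl (fun st p => pvBStep st p.1 p.2) ((none, [], PySem.Set.empty))) =
      if M = [] then (none, [], PySem.Set.empty)
      else (some (pvMin M), pvBests M, PySem.Set.ofList (pvBests M)) := by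
  induction M using List.reverseRecOn with
  | nil => simp
  | append_singleton M x ih =>
    rw [List.foldl_append, ih, if_neg (by simp : ¬ M ++ [x] = [])]
    by_cases hM : M = []
    · subst hM
      have h1 : pvMin [x] = x.2 := by simp [pvMin]
      have h2 : pvBests [x] = [x.1] := by
        simp [pvBests, PySem.Set.ofList, PySem.Set.add, h1]
      simp only [List.nil_append, h1, h2]
      simp [pvBStep, PySem.Set.ofList, PySem.Set.add, PySem.Set.empty]
    · rw [if_neg hM]
      have hminapp := pvMin_append M x
      rw [if_neg hM] at hminapp
      have hofl : PySem.Set.ofList (M ++ [x]) = PySem.Set.add (PySem.Set.ofList M) x :=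
        PySem.Set.ofList_append_singleton M x
      simp only [List.foldl_cons, List.foldl_nil, pvBStep]
      split_ifs with h1 h2
      · -- x.2 < pvMin M : strictly better, reset
        have hxM : x ∉ M := fun hmem => absurd (pvMin_le M hmem) (by omega)
        have hmin' : pvMin (M ++ [x]) = x.2 := by rw [hminapp]; omega
        have hb : pvBests (M ++ [x]) = [x.1] := by
          unfold pvBests
          rw [hmin', hofl, PySem.Set.add_eq_ite,
            if_neg (by simpa [PySem.Set.mem_ofList] using hxM), List.filter_append]
          have hnil : (PySem.Set.ofList M).filter (fun p => p.2 == x.2) = [] := by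
            refine List.filter_eq_nil_iff.2 (fun p hp => ?_)
            have := pvMin_le M ((PySem.Set.mem_ofList M p).1 hp)
            simp only [beq_iff_eq]
            omega
          rw [hnil]
          simp
        rw [hmin', hb]
        simp [PySem.Set.add, PySem.Set.ofList, PySem.Set.empty]
      · -- tie, new abbreviation: append
        obtain ⟨heq, hns⟩ := Bool.and_eq_true_iff.1 h2
        have heq' : x.2 = pvMin M := beq_iff_eq.1 heq
        have hseen : x.1 ∉ PySem.Set.ofList (pvBests M) := by
          simpa using hns
        have hxM : x ∉ M := by
          intro hmem
          refine hseen ((PySem.Set.mem_ofList _ _).2 ((pvBests_mem M x.1).2 ?_))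
          rwa [← heq', Prod.mk.eta]
        have hmin' : pvMin (M ++ [x]) = pvMin M := by rw [hminapp]; omega
        have hb : pvBests (M ++ [x]) = pvBests M ++ [x.1] := by
          unfold pvBests
          rw [hmin', hofl, PySem.Set.add_eq_ite,
            if_neg (by simpa [PySem.Set.mem_ofList] using hxM), List.filter_append]
          simp [heq']
        rw [hmin', hb, PySem.Set.ofList_append_singleton]
      · -- no improvement: state unchanged
        have hmin' : pvMin (M ++ [x]) = pvMin M := by
          rw [hminapp]; omega
        have hb : pvBests (M ++ [x]) = pvBests M := by
          by_cases heq : x.2 = pvMin M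
          · -- tie but already seen: x itself is already in M
            have hseen : x.1 ∈ PySem.Set.ofList (pvBests M) := by
              by_contra hns
              exact h2 (by simp [heq, hns])
            have hxM : x ∈ M := by
              have := (pvBests_mem M x.1).1 ((PySem.Set.mem_ofList _ _).1 hseen)
              rwa [← heq, Prod.mk.eta] at this
            unfold pvBests
            rw [hmin', hofl, PySem.Set.add_eq_ite,
              if_pos ((PySem.Set.mem_ofList M x).2 hxM)]
          · -- strictly worse: x filtered out
            unfold pvBests
            rw [hmin', hofl, PySem.Set.add_eq_ite]
            by_cases hxM : x ∈ PySem.Set.ofList M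
            · rw [if_pos hxM]
            · rw [if_neg hxM, List.filter_append]
              simp [heq]
        rw [hmin', hb]

-- A's tail (filter + min + filter) over the deduped stream gives the same best list
theorem pvA_tail (M : List (String × Int)) :
    (if (PySem.Set.ofList M : List (String × Int)) ≠ [] then
        ((((PySem.Set.ofList M : List (String × Int)).filter
            (fun p => p.2 == ((PySem.Set.ofList M : List (String × Int)).map (fun p => p.2)).foldl min
              (((PySem.Set.ofList M : List (String × Int)).map (fun p => p.2)).headD 0)))).map (fun p => p.1))
      else []) = (if M = [] then [] else pvBests M) := by
  by_cases hM : M = []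
  · subst hM
    simp [PySem.Set.ofList]
  · obtain ⟨a, ha⟩ := List.exists_mem_of_ne_nil M hM
    have hne : (PySem.Set.ofList M : List (String × Int)) ≠ [] :=
      List.ne_nil_of_mem ((PySem.Set.mem_ofList M a).2 ha)
    rw [if_pos hne, if_neg hM]
    have hmin : ((PySem.Set.ofList M : List (String × Int)).map (fun p => p.2)).foldl min
        (((PySem.Set.ofList M : List (String × Int)).map (fun p => p.2)).headD 0) = pvMin M := by
      unfold pvMin
      refine pvFoldMin_congr _ _ ?_ ?_ ?_
      · simpa using hne
      · simpa using hM
      · intro y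
        simp [List.mem_map, PySem.Set.mem_ofList]
    rw [hmin]
    rfl

-- ===== VERDICT (by name: the statement is the Claim_ definition above) =====
theorem find_best_abbreviation_spec : Claim_equal_find_best_abbreviation := by
  intro name ls used _
  unfold Spec_find_best_abbreviation
  rw [pvAlt_eq]
  unfold find_best_abbreviation
  rw [pvGenerate_eq]
  dsimp only
  rw [PySem.List.foldl_append_if
      (p := fun t : String × Int × String => !((PySem.Dict.mk used).getD t.2.2 []).contains t.1)
      (f := fun t : String × Int × String => (t.1, t.2.1))]
  rw [pvSet_ofList_map_inj _ (fun a b hab => by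
    have h1 := congrArg (fun p : String × Int × String => p.1) hab
    have h2 := congrArg (fun p : String × Int × String => p.2.1) hab
    exact Prod.ext h1 h2)]
  rw [List.filter_map, List.map_map]
  simp only [List.nil_append, Function.comp_def, Prod.mk.eta, List.map_id_fun', id]
  rw [← pvSet_ofList_filter]
  rw [pvFold_spec]
  rw [pvA_tail]
  by_cases hM : ((pvAll ls (PySem.Chars.split₀ (PySem.Chars.replace (PySem.Chars.upper name.toList) ['\''] []))).filter
      (fun p => !((PySem.Dict.mk used).getD (String.ofList (PySem.Chars.replace (PySem.Chars.upper name.toList) ['\''] [])) []).contains p.1)) = []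
  · rw [if_pos hM, if_pos hM]
  · rw [if_neg hM, if_neg hM]
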